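-- pv_equiv track=rewrite | github.com/simber72/PTPNperfbound | fromArpe/pattern_discovery.py | cand_gen
-- ===== SOURCE A (Python) =====
-- def cand_gen(list_disc, list_comp=None):
--     """
--     Candidate Generation: two overlapping patterns form a candidate with a least one from
--     list_disc: list of previous discoverd patterns (at least one needed)
--     list_comp: list of patterns with other support
--     return list_cand: list of possible patterns
--     complexity: O(2*len(list_disc)*len(list_comp)+len(list_disc)²) <= O(3*nb_pattenrs) <= O(3*l²)
--     """
--     if list_comp is None:
--         list_comp = []
--     list_cand = []
--     list_tot = list_disc + list_comp
--     for pattern1 in list_disc: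
--         for pattern2 in list_tot:
--             if pattern1[1:] == pattern2[:-1]:
--                 list_cand.append([pattern1[0]] + pattern2)
--     for pattern1 in list_comp:
--         for pattern2 in list_disc:
--             if pattern1[1:] == pattern2[:-1]:
--                 list_cand.append([pattern1[0]] + pattern2)
--     return list_cand
-- ===== SOURCE B (Python) =====
-- def cand_gen(list_disc, list_comp=None):
--     # Same candidates as A, but patterns are indexed once by their prefix (p[:-1]),
--     # so each pattern1 does a single dict lookup instead of scanning the whole list.
--     if list_comp is None:
--         list_comp = []
--     index_tot = {}
--     for p in list_disc + list_comp:
--         index_tot.setdefault(tuple(p[:-1]), []).append(p)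
--     index_disc = {}
--     for p in list_disc:
--         index_disc.setdefault(tuple(p[:-1]), []).append(p)
--     list_cand = []
--     for p1 in list_disc:
--         for p2 in index_tot.get(tuple(p1[1:]), []):
--             list_cand.append([p1[0]] + p2)
--     for p1 in list_comp:
--         for p2 in index_disc.get(tuple(p1[1:]), []):
--             list_cand.append([p1[0]] + p2)
--     return list_cand
-- ===== Notes on version B (the rewrite author's own statement) =====
-- stated objective: alternative
-- what changed: B builds a dict indexing patterns by their prefix tuple p[:-1] once and looks up each pattern1's suffix p1[1:] in it, replacing A's inner scan over all patterns; the candidate-construction cost (output size) still dominates on dense inputs, so no unqualified speed claim.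
import Mathlib
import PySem

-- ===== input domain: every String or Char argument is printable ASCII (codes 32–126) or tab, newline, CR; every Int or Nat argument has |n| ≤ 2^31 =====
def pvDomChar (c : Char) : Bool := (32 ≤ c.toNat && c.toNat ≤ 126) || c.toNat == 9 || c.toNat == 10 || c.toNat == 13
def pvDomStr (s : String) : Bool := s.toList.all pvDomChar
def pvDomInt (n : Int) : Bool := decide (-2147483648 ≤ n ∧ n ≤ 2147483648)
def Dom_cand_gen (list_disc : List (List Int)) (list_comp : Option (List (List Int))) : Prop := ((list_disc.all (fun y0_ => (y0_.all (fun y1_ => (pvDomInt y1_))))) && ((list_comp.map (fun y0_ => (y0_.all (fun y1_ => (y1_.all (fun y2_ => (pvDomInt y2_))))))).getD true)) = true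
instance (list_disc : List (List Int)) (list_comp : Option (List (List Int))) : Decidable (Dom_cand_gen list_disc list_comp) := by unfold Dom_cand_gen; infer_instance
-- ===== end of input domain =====

-- B indexes the patterns once by their prefix p[:-1] so each pattern1 does one dict
-- lookup instead of scanning every pattern; same output list in the same order.

-- ===== PORT A =====
-- pattern1[0] can only raise IndexError when an empty pattern1 matches; those inputs are
-- excluded by Pre_cand_gen, so the `.getD 0` default is never the returned value there.
def cand_gen (list_disc : List (List Int)) (list_comp : Option (List (List Int))) : List (List Int) :=
  let lc := list_comp.getD []                  -- if list_comp is None: list_comp = []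
  let list_tot := list_disc ++ lc
  let out1 := list_disc.foldl (fun acc p1 =>
    list_tot.foldl (fun a p2 =>
      if PySem.List.slice p1 (some 1) none = PySem.List.slice p2 none (some (-1)) then
        a ++ [(PySem.List.pyGet? p1 0).getD 0 :: p2]
      else a) acc) []
  lc.foldl (fun acc p1 =>
    list_disc.foldl (fun a p2 =>
      if PySem.List.slice p1 (some 1) none = PySem.List.slice p2 none (some (-1)) then
        a ++ [(PySem.List.pyGet? p1 0).getD 0 :: p2]
      else a) acc) out1

-- ===== PORT B =====
-- index.setdefault(tuple(p[:-1]), []).append(p): d[k] = d.get(k, []) + [p]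
def cgIndex (l : List (List Int)) : PySem.Dict (List Int) (List (List Int)) :=
  l.foldl (fun d p => d.modify (PySem.List.slice p none (some (-1))) [] (· ++ [p])) PySem.Dict.empty

def cand_gen_alt (list_disc : List (List Int)) (list_comp : Option (List (List Int))) : List (List Int) :=
  let lc := list_comp.getD []
  let idxTot := cgIndex (list_disc ++ lc)
  let idxDisc := cgIndex list_disc
  let out1 := list_disc.foldl (fun acc p1 =>
    (idxTot.getD (PySem.List.slice p1 (some 1) none) []).foldl (fun a p2 =>
      a ++ [(PySem.List.pyGet? p1 0).getD 0 :: p2]) acc) []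
  lc.foldl (fun acc p1 =>
    (idxDisc.getD (PySem.List.slice p1 (some 1) none) []).foldl (fun a p2 =>
      a ++ [(PySem.List.pyGet? p1 0).getD 0 :: p2]) acc) out1

-- ===== PRECONDITION & SPEC =====
-- Pre_ excludes exactly the inputs where the Python A raises IndexError (indexing an
-- empty pattern1 after its overlap condition matched); B raises there too.
def Pre_cand_gen (list_disc : List (List Int)) (list_comp : Option (List (List Int))) : Prop :=
  ([] ∉ list_disc) ∧ ([] ∈ list_comp.getD [] → ∀ p ∈ list_disc, 2 ≤ p.length)
instance (list_disc : List (List Int)) (list_comp : Option (List (List Int))) : Decidable (Pre_cand_gen list_disc list_comp) := by unfold Pre_cand_gen; infer_instance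

def pvWitness_cand_gen : List (List Int) × Option (List (List Int)) :=
  ([[1, 2], [2, 3]], some [[3, 4]])

def Spec_cand_gen (list_disc : List (List Int)) (list_comp : Option (List (List Int))) (out : List (List Int)) : Prop := out = cand_gen_alt list_disc list_comp
instance (list_disc : List (List Int)) (list_comp : Option (List (List Int))) (out : List (List Int)) : Decidable (Spec_cand_gen list_disc list_comp out) := by unfold Spec_cand_gen; infer_instance

-- ===== CLAIM (what is proved, stated in full; the proofs are below) =====
def Claim_equal_cand_gen : Prop := ∀ (list_disc : List (List Int)) (list_comp : Option (List (List Int))), Dom_cand_gen list_disc list_comp → Pre_cand_gen list_disc list_comp → Spec_cand_gen list_disc list_comp (cand_gen list_disc list_comp)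

-- ===== LEMMAS AND PROOFS =====

-- The bucket for key c is exactly the patterns whose prefix p[:-1] equals c, in order.
lemma cgIndex_getD (l : List (List Int)) (c : List Int) :
    (cgIndex l).getD c [] = l.filter (fun p => PySem.List.slice p none (some (-1)) == c) := by
  unfold cgIndex
  rw [show (l.foldl (fun d p => d.modify (PySem.List.slice p none (some (-1))) [] (· ++ [p]))
        PySem.Dict.empty)
      = ((l.map (fun p => (PySem.List.slice p none (some (-1)), p))).foldl
          (fun d q => d.modify q.1 [] (· ++ [q.2])) PySem.Dict.empty) from (List.foldl_map (f := fun p => (PySem.List.slice p none (some (-1)), p)) (g := fun (d : PySem.Dict (List Int) (List (List Int))) q => d.modify q.1 [] (· ++ [q.2])) (l := l) (init := PySem.Dict.empty)).symm]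
  rw [PySem.Dict.getD_foldl_modify_append, List.filter_map, List.map_map]
  simp [Function.comp_def]

-- One pass of A (scan src for each p1) equals one pass of B (one bucket lookup per p1).
lemma pass_eq (outer src : List (List Int)) (init : List (List Int)) :
    outer.foldl (fun acc p1 =>
      src.foldl (fun a p2 =>
        if PySem.List.slice p1 (some 1) none = PySem.List.slice p2 none (some (-1)) then
          a ++ [(PySem.List.pyGet? p1 0).getD 0 :: p2]
        else a) acc) init
    = outer.foldl (fun acc p1 =>
        ((cgIndex src).getD (PySem.List.slice p1 (some 1) none) []).foldl (fun a p2 =>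
          a ++ [(PySem.List.pyGet? p1 0).getD 0 :: p2]) acc) init := by
  apply PySem.List.foldl_congr_mem
  intro acc p1 _
  rw [cgIndex_getD, PySem.List.foldl_append_ite, PySem.List.foldl_append_singleton_eq_map]
  congr 1
  apply congrArg
  apply List.filter_congr
  intro p2 _
  by_cases h : PySem.List.slice p1 (some 1) none = PySem.List.slice p2 none (some (-1))
  · rw [h]; simp
  · have h2 : PySem.List.slice p2 none (some (-1)) ≠ PySem.List.slice p1 (some 1) none :=
      fun hh => h hh.symm
    simp [h, h2]

-- ===== VERDICT (by name: the statement is the Claim_ definition above) =====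
theorem cand_gen_spec : Claim_equal_cand_gen := by
  intro list_disc list_comp _ _
  unfold Spec_cand_gen cand_gen cand_gen_alt
  rw [pass_eq, pass_eq]
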